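-- pv_equiv track=rewrite | github.com/eronekogin/leetcode | 2025/count_paths_that_can_form_a_palindrome_in_a_tree.py | count_palindrome_paths
-- ===== SOURCE A (Python) =====
-- from collections import Counter
-- from functools import cache
--
-- def count_palindrome_paths(parent: list[int], s: str) -> int:
--     """
--     count palindrome paths
--     """
--     @cache
--     def node_to_root_mask(node: int) -> int:
--         if node == 0:
--             return 0
--
--         return node_to_root_mask(parent[node]) ^ (1 << (ord(s[node]) - base))
--
--     base = ord('a')
--     cnt = Counter()
--     pairs = 0
--
--     for node in range(len(parent)):
--         # left ^ (left ^ (1 << j)) = (1 << j), which means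
--         # there is at most only 1 char set in the middle
--         # which can form a palindrome
--         left = node_to_root_mask(node)
--         pairs += cnt[left] + sum(cnt[left ^ (1 << j)] for j in range(26))
--         cnt[left] += 1
--
--     return pairs
-- ===== SOURCE B (Python) =====
-- def count_palindrome_paths(parent: list[int], s: str) -> int:
--     """
--     count palindrome paths
--     """
--     n = len(parent)
--     if n == 0:
--         return 0
--     # bottom-up DP over indices (valid since parent[i] < i): masks[i] is the
--     # XOR bitmask of char parities on the path from node i to the root.
--     masks = [0]
--     for i in range(1, n):
--         masks.append(masks[parent[i]] ^ (1 << (ord(s[i]) - 97)))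
--     pairs = 0
--     cnt = {}
--     for m in masks:
--         c = cnt.get(m, 0)
--         pairs += c
--         for j in range(26):
--             pairs += cnt.get(m ^ (1 << j), 0)
--         cnt[m] = c + 1
--     return pairs
-- ===== Notes on version B (the rewrite author's own statement) =====
-- stated objective: simpler
-- what changed: Replaces the cached recursion up parent pointers (plus Counter) with a single forward dynamic-programming pass that fills a masks array in index order (valid because parent[i] < i), followed by a separate plain-dict counting pass.
-- outside the precondition, e.g. on count_palindrome_paths([0, 2, 0], 'aab'): A returns 2, B raises IndexError
import Mathlib
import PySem

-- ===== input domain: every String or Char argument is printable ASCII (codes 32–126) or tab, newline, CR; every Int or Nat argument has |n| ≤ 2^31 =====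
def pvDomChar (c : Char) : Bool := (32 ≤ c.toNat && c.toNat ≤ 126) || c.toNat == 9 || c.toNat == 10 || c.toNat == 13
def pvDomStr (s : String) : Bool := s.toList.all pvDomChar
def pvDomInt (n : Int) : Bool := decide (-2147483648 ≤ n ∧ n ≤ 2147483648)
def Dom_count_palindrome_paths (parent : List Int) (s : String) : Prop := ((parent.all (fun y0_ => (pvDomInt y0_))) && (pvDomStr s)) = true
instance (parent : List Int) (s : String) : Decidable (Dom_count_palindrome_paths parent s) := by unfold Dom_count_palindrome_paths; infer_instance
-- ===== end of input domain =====

-- B replaces A's cached recursion up parent pointers by a forward DP pass filling a masks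
-- array in index order, then a separate plain-dict counting pass (same asymptotic cost).

-- ===== PORT A =====
-- ord(s[i]); the default 'a' is never used on inputs admitted by Pre_ (i < len(s) there)
def pvCode (s : String) (i : Nat) : Nat := ((PySem.Str.pyGet? s (i : Int)).getD 'a').toNat

-- node_to_root_mask: the cached recursion of A (the cache only memoizes values, it does not
-- change them). The two guards (pyGetD default, `p < node`) only make the recursion total;
-- under Pre_ they never fire.
def pvMaskA (parent : List Int) (s : String) (node : Nat) : Nat :=
  if node = 0 then 0
  else
    let p := (PySem.List.pyGetD parent (node : Int) 0).toNat
    if _hlt : p < node then pvMaskA parent s p ^^^ (1 <<< (pvCode s node - 97)) else 0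
termination_by node
decreasing_by exact _hlt

def count_palindrome_paths (parent : List Int) (s : String) : Int :=
  ((List.range parent.length).foldl
    (fun (st : PySem.Dict Nat Int × Int) node =>
      let left := pvMaskA parent s node
      let pairs := st.2 + (st.1.getD left 0 +
        ((List.range 26).map (fun j => st.1.getD (left ^^^ (1 <<< j)) 0)).sum)
      (st.1.modify left 0 (· + 1), pairs))
    (PySem.Dict.empty, 0)).2

-- ===== PORT B =====
-- masks = [0]; for i in range(1, n): masks.append(masks[parent[i]] ^ (1 << (ord(s[i]) - 97)))
def pvMasksB (parent : List Int) (s : String) : List Nat :=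
  (List.range' 1 (parent.length - 1)).foldl
    (fun (m : List Nat) (i : Nat) =>
      m ++ [m.getD (PySem.List.pyGetD parent (i : Int) 0).toNat 0 ^^^ (1 <<< (pvCode s i - 97))])
    [0]

-- the counting pass of Source B over the masks list
def pvCountB (ms : List Nat) : Int :=
  (ms.foldl (fun (st : PySem.Dict Nat Int × Int) mk =>
      let c := st.1.getD mk 0
      let p := st.2 + c
      let p2 := (List.range 26).foldl (fun a j => a + st.1.getD (mk ^^^ (1 <<< j)) 0) p
      (st.1.insert mk (c + 1), p2))
    (PySem.Dict.empty, 0)).2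

def count_palindrome_paths_alt (parent : List Int) (s : String) : Int :=
  if parent.length = 0 then 0 else pvCountB (pvMasksB parent s)

-- ===== PRECONDITION & SPEC =====
-- Pre_ restricts to canonical parent arrays: 0 ≤ parent[i] < i for i ≥ 1, s covers every such
-- node and its char is ≥ 'a'. Outside it A raises (IndexError / ValueError on 1 << negative /
-- RecursionError on cycles) — except on non-canonical arrays whose recursion happens to
-- terminate (forward pointers, negative-index wraparound), which Pre_ also excludes because
-- B's forward DP assumes the canonical (LeetCode-guaranteed) shape; see the claim's cites.
def Pre_count_palindrome_paths (parent : List Int) (s : String) : Prop :=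
  ∀ i : Nat, i < parent.length → 1 ≤ i →
    0 ≤ parent.getD i 0 ∧ parent.getD i 0 < (i : Int) ∧
    i < s.toList.length ∧ 97 ≤ (s.toList.getD i 'a').toNat
instance (parent : List Int) (s : String) : Decidable (Pre_count_palindrome_paths parent s) := by
  unfold Pre_count_palindrome_paths; infer_instance

def pvWitness_count_palindrome_paths : List Int × String := ([0, 0, 0, 1, 1], "abaab")

def Spec_count_palindrome_paths (parent : List Int) (s : String) (out : Int) : Prop := out = count_palindrome_paths_alt parent s
instance (parent : List Int) (s : String) (out : Int) : Decidable (Spec_count_palindrome_paths parent s out) := by unfold Spec_count_palindrome_paths; infer_instance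

-- ===== CLAIM (what is proved, stated in full; the proofs are below) =====
def Claim_equal_count_palindrome_paths : Prop := ∀ (parent : List Int) (s : String), Dom_count_palindrome_paths parent s → Pre_count_palindrome_paths parent s → Spec_count_palindrome_paths parent s (count_palindrome_paths parent s)

-- ===== LEMMAS AND PROOFS =====

-- the masks list built by B is exactly the table of A's recursion
theorem pvMasksB_eq (parent : List Int) (s : String)
    (hpre : Pre_count_palindrome_paths parent s) :
    ∀ k, k < parent.length →
      (List.range' 1 k).foldl
        (fun (m : List Nat) (i : Nat) =>
          m ++ [m.getD (PySem.List.pyGetD parent (i : Int) 0).toNat 0 ^^^ (1 <<< (pvCode s i - 97))])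
        [0]
      = (List.range (k + 1)).map (pvMaskA parent s) := by
  intro k
  induction k with
  | zero => intro _; simp [pvMaskA]
  | succ k ih =>
    intro hk
    have hk' : k < parent.length := Nat.lt_of_succ_lt hk
    rw [List.range'_concat, List.foldl_append, ih hk']
    have e1 : 1 + 1 * k = k + 1 := by omega
    rw [e1]
    simp only [List.foldl_cons, List.foldl_nil]
    have hi := hpre (k + 1) hk (by omega)
    have hidx : PySem.List.pyGetD parent ((k + 1 : Nat) : Int) 0 = parent.getD (k + 1) 0 :=
      PySem.List.pyGetD_natCast parent (k + 1) 0
    have hp : (parent.getD (k + 1) 0).toNat < k + 1 := by omega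
    rw [hidx, PySem.List.getD_map_range _ _ _ _ (by omega)]
    have hstep : pvMaskA parent s (k + 1) =
        pvMaskA parent s (parent.getD (k + 1) 0).toNat ^^^ (1 <<< (pvCode s (k + 1) - 97)) := by
      rw [pvMaskA, if_neg (by omega : ¬ (k + 1 = 0))]
      simp only [hidx]
      rw [dif_pos hp]
    rw [← hstep, List.range_succ (n := k + 1), List.map_append]
    rfl

-- the two counting loops agree whenever their dicts agree pointwise (A uses Counter/modify,
-- B uses a plain dict with get/insert; the pairs accumulators are threaded differently)
theorem pvCount_eq (ms : List Nat) :
    ∀ (d1 d2 : PySem.Dict Nat Int) (p : Int), (∀ k, d1.getD k 0 = d2.getD k 0) →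
      (ms.foldl
        (fun (st : PySem.Dict Nat Int × Int) left =>
          let pairs := st.2 + (st.1.getD left 0 +
            ((List.range 26).map (fun j => st.1.getD (left ^^^ (1 <<< j)) 0)).sum)
          (st.1.modify left 0 (· + 1), pairs)) (d1, p)).2
      = (ms.foldl
        (fun (st : PySem.Dict Nat Int × Int) mk =>
          let c := st.1.getD mk 0
          let p := st.2 + c
          let p2 := (List.range 26).foldl (fun a j => a + st.1.getD (mk ^^^ (1 <<< j)) 0) p
          (st.1.insert mk (c + 1), p2)) (d2, p)).2 := by
  induction ms with
  | nil => intro d1 d2 p _; rfl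
  | cons m t ih =>
    intro d1 d2 p h
    simp only [List.foldl_cons]
    rw [PySem.List.foldl_add]
    have hsum : ((List.range 26).map (fun j => d1.getD (m ^^^ (1 <<< j)) 0)).sum
        = ((List.range 26).map (fun j => d2.getD (m ^^^ (1 <<< j)) 0)).sum := by
      simp only [h]
    rw [hsum, h m]
    have harith : p + (d2.getD m 0 + ((List.range 26).map (fun j => d2.getD (m ^^^ (1 <<< j)) 0)).sum)
        = p + d2.getD m 0 + ((List.range 26).map (fun j => d2.getD (m ^^^ (1 <<< j)) 0)).sum := by ring
    rw [harith]
    apply ih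
    intro k
    rw [PySem.Dict.getD_modify, PySem.Dict.getD_insert]
    by_cases hk : k = m
    · simp [hk, h m]
    · simp [hk, h k]

-- ===== VERDICT (by name: the statement is the Claim_ definition above) =====
theorem count_palindrome_paths_spec : Claim_equal_count_palindrome_paths := by
  intro parent s _hdom hpre
  unfold Spec_count_palindrome_paths count_palindrome_paths count_palindrome_paths_alt
  by_cases hn : parent.length = 0
  · simp [hn, List.range_zero]
  · rw [if_neg hn]
    obtain ⟨m, hm⟩ : ∃ m, parent.length = m + 1 := ⟨parent.length - 1, by omega⟩
    have hmask : pvMasksB parent s = (List.range parent.length).map (pvMaskA parent s) := by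
      unfold pvMasksB
      rw [hm]
      simpa using pvMasksB_eq parent s hpre m (by omega)
    unfold pvCountB
    rw [hmask]
    have h2 := pvCount_eq ((List.range parent.length).map (pvMaskA parent s))
      PySem.Dict.empty PySem.Dict.empty 0 (fun _ => rfl)
    rw [← h2, List.foldl_map]
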